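-- pv_equiv track=rewrite | github.com/Ashi-s/coding_problems | DevPost/ibm.py/ibm.py | my_approach
-- ===== SOURCE A (Python) =====
-- def my_approach(s):
--     zeroes = []
--     ones = []
--     for i in range(len(s)):
--         if s[i] == 0:
--             continue
--         else:
--             zeroes.append(len(s[i+1:]) - sum(s[i+1:]))
--     for i in range(len(s)):
--         if s[i] == 1:
--             continue
--         else:
--             ones.append(len(s[i+1:]) - sum(s[i+1:]))
--     return min(sum(ones), sum(zeroes))
-- ===== SOURCE B (Python) =====
-- def my_approach(s):
--     z = o = c = 0
--     for x in reversed(s):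
--         if x != 0:
--             z += c
--         if x != 1:
--             o += c
--         c += 1 - x
--     return min(o, z)
-- ===== Notes on version B (the rewrite author's own statement) =====
-- stated objective: faster
-- what changed: A rebuilds and sums the suffix s[i+1:] for every index in two separate index loops (quadratic); B makes a single right-to-left pass maintaining the suffix zero-weight (len-sum) as a running value and accumulating both aggregates at once.
import Mathlib
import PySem

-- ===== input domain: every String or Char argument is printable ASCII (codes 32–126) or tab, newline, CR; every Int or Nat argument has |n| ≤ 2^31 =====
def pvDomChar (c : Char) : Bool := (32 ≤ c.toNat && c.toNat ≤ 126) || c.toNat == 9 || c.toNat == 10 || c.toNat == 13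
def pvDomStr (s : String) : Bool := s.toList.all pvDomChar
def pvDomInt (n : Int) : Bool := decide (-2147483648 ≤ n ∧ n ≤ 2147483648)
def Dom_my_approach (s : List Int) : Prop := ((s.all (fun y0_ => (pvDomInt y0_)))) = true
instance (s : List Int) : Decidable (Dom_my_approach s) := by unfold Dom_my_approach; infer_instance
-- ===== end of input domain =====

-- B replaces A's quadratic per-index re-slicing by one right-to-left pass that
-- maintains the suffix zero-weight as a running value (objective: faster, asymptotic).

-- ===== PORT A =====
-- one 'for i in range(len(s))' loop of A: skip when s[i] == pv, else append len(s[i+1:]) - sum(s[i+1:])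
def aLoop (s : List Int) (pv : Int) : List Int :=
  (PySem.List.pyRange 0 (s.length : Int) 1).foldl
    (fun acc i =>
      if PySem.List.pyGetD s i 0 == pv then acc
      else acc ++ [((PySem.List.slice s (some (i + 1)) none).length : Int)
                   - (PySem.List.slice s (some (i + 1)) none).sum]) []

def my_approach (s : List Int) : Int :=
  min (aLoop s 1).sum (aLoop s 0).sum

-- ===== PORT B =====
-- one step of B's loop over reversed(s); state (z, o, c), c = zero-weight of the suffix seen so far
def bStep (x : Int) (acc : Int × Int × Int) : Int × Int × Int :=
  (acc.1 + (if x ≠ 0 then acc.2.2 else 0),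
   acc.2.1 + (if x ≠ 1 then acc.2.2 else 0),
   acc.2.2 + 1 - x)

def my_approach_alt (s : List Int) : Int :=
  let st := s.foldr bStep (0, 0, 0)
  min st.2.1 st.1

-- ===== PRECONDITION & SPEC =====
def Spec_my_approach (s : List Int) (out : Int) : Prop := out = my_approach_alt s
instance (s : List Int) (out : Int) : Decidable (Spec_my_approach s out) := by unfold Spec_my_approach; infer_instance

-- ===== CLAIM (what is proved, stated in full; the proofs are below) =====
def Claim_equal_my_approach : Prop := ∀ (s : List Int), Dom_my_approach s → Spec_my_approach s (my_approach s)

-- ===== LEMMAS AND PROOFS =====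

-- A's loop body with the branches flipped into the shape of PySem.List.foldl_append_if
theorem aLoop_eq_map_filter (s : List Int) (pv : Int) (l : List Int) (acc : List Int) :
    l.foldl
      (fun acc i =>
        if PySem.List.pyGetD s i 0 == pv then acc
        else acc ++ [((PySem.List.slice s (some (i + 1)) none).length : Int)
                     - (PySem.List.slice s (some (i + 1)) none).sum]) acc
    = acc ++ (l.filter
                (fun i => !(PySem.List.pyGetD s i 0 == pv))).map
              (fun i => ((PySem.List.slice s (some (i + 1)) none).length : Int)
                        - (PySem.List.slice s (some (i + 1)) none).sum) := by
  rw [← PySem.List.foldl_append_if (fun i => !(PySem.List.pyGetD s i 0 == pv))]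
  congr 1
  funext a i
  by_cases h : PySem.List.pyGetD s i 0 == pv <;> simp [h]

theorem pyRange_shift (n : Nat) :
    PySem.List.pyRange 1 ((n : Int) + 1) 1
      = (PySem.List.pyRange 0 (n : Int) 1).map (fun i => i + 1) := by
  rw [PySem.List.pyRange_one, PySem.List.pyRange_one]
  simp [List.map_map, Function.comp_def]
  omega

theorem aLoop_sum_cons (x : Int) (xs : List Int) (pv : Int) :
    (aLoop (x :: xs) pv).sum
      = (if x == pv then 0 else ((xs.length : Int) - xs.sum)) + (aLoop xs pv).sum := by
  unfold aLoop
  have hlen : ((x :: xs).length : Int) = (xs.length : Int) + 1 := by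
    simp
  rw [hlen, PySem.List.pyRange_one_cons (by positivity)]
  rw [List.foldl_cons]
  rw [show ((0 : Int) + 1) = 1 from rfl]
  rw [pyRange_shift xs.length]
  rw [aLoop_eq_map_filter (x :: xs) pv ((PySem.List.pyRange 0 (xs.length : Int) 1).map (fun i => i + 1)),
      aLoop_eq_map_filter xs pv (PySem.List.pyRange 0 (xs.length : Int) 1)]
  rw [List.filter_map, List.map_map]
  have hfil :
      (PySem.List.pyRange 0 (xs.length : Int) 1).filter
          ((fun i => !(PySem.List.pyGetD (x :: xs) i 0 == pv)) ∘ (fun i => i + 1))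
        = (PySem.List.pyRange 0 (xs.length : Int) 1).filter
            (fun i => !(PySem.List.pyGetD xs i 0 == pv)) := by
    apply List.filter_congr
    intro i hi
    rcases (PySem.List.mem_pyRange_one).1 hi with ⟨h0, _⟩
    obtain ⟨k, rfl⟩ := Int.eq_ofNat_of_zero_le h0
    have hcast : (k : Int) + 1 = ((k + 1 : Nat) : Int) := by push_cast; ring
    simp only [Function.comp_apply, hcast, PySem.List.pyGetD_natCast, List.getD_cons_succ]
  rw [hfil]
  have hmap :
      ((PySem.List.pyRange 0 (xs.length : Int) 1).filter
          (fun i => !(PySem.List.pyGetD xs i 0 == pv))).map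
        ((fun i => ((PySem.List.slice (x :: xs) (some (i + 1)) none).length : Int)
                   - (PySem.List.slice (x :: xs) (some (i + 1)) none).sum) ∘ (fun i => i + 1))
      = ((PySem.List.pyRange 0 (xs.length : Int) 1).filter
          (fun i => !(PySem.List.pyGetD xs i 0 == pv))).map
          (fun i => ((PySem.List.slice xs (some (i + 1)) none).length : Int)
                    - (PySem.List.slice xs (some (i + 1)) none).sum) := by
    apply List.map_congr_left
    intro i hi
    have hi' := List.mem_of_mem_filter hi
    rcases (PySem.List.mem_pyRange_one).1 hi' with ⟨h0, _⟩
    have hs1 : PySem.List.slice (x :: xs) (some (i + 1 + 1))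
        = PySem.List.slice xs (some (i + 1)) := by
      rw [PySem.List.slice_from (x :: xs) (by omega : (0:Int) ≤ i + 1 + 1),
          PySem.List.slice_from xs (by omega : (0:Int) ≤ i + 1)]
      have hnat : (i + 1 + 1).toNat = (i + 1).toNat + 1 := by omega
      rw [hnat, List.drop_succ_cons]
    simp [Function.comp, hs1]
  rw [hmap]
  by_cases h : x == pv
  · simp [PySem.List.pyGetD_zero_cons, h]
  · simp [PySem.List.pyGetD_zero_cons, PySem.List.slice_from_one, h]
    try ring

-- the invariant of B's single pass: foldr bStep computes (zeroes-sum, ones-sum, suffix zero-weight)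
theorem bFold_eq (s : List Int) :
    s.foldr bStep (0, 0, 0)
      = ((aLoop s 0).sum, (aLoop s 1).sum, (s.length : Int) - s.sum) := by
  induction s with
  | nil =>
    simp [aLoop, PySem.List.pyRange_one_eq_nil (by omega : (0:Int) ≤ 0)]
  | cons x xs ih =>
    rw [List.foldr_cons, ih]
    unfold bStep
    simp only [aLoop_sum_cons]
    refine Prod.ext ?_ (Prod.ext ?_ ?_)
    · by_cases h : x = 0 <;> (simp [h]; try ring)
    · by_cases h : x = 1 <;> (simp [h]; try ring)
    · simp; ring

-- ===== VERDICT (by name: the statement is the Claim_ definition above) =====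
theorem my_approach_spec : Claim_equal_my_approach := by
  intro s _
  unfold Spec_my_approach my_approach my_approach_alt
  rw [bFold_eq]
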